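-- pv_equiv track=rewrite | github.com/3xt3r/distrib | sbom_alt_cve_working.py | rpmvercmp_segment
-- ===== SOURCE A (Python) =====
-- def rpmvercmp_segment(a: str, b: str) -> int:
--     """Pure Python approximation of rpmvercmp, handles alnum, ~ and ^."""
--     if a == b:
--         return 0
--     i = j = 0
--     la, lb = len(a), len(b)
--
--     while i < la or j < lb:
--         while i < la and not a[i].isalnum() and a[i] not in "~^":
--             i += 1
--         while j < lb and not b[j].isalnum() and b[j] not in "~^":
--             j += 1
--
--         if i < la and a[i] == "~":
--             if j >= lb or b[j] != "~":
--                 return -1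
--             i += 1; j += 1
--             continue
--         if j < lb and b[j] == "~":
--             return 1
--
--         if i < la and a[i] == "^":
--             if j >= lb:
--                 return 1
--             if b[j] != "^":
--                 return 1
--             i += 1; j += 1
--             continue
--         if j < lb and b[j] == "^":
--             if i >= la:
--                 return -1
--             return -1
--
--         if i >= la or j >= lb:
--             break
--
--         isnum_a = a[i].isdigit()
--         isnum_b = b[j].isdigit()
--
--         ia = i
--         if isnum_a:
--             while i < la and a[i].isdigit():
--                 i += 1
--             seg_a = a[ia:i].lstrip("0") or "0"
--         else:
--             while i < la and a[i].isalpha():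
--                 i += 1
--             seg_a = a[ia:i]
--
--         jb = j
--         if isnum_b:
--             while j < lb and b[j].isdigit():
--                 j += 1
--             seg_b = b[jb:j].lstrip("0") or "0"
--         else:
--             while j < lb and b[j].isalpha():
--                 j += 1
--             seg_b = b[jb:j]
--
--         if isnum_a and not isnum_b:
--             return 1
--         if not isnum_a and isnum_b:
--             return -1
--
--         if isnum_a and len(seg_a) != len(seg_b):
--             return 1 if len(seg_a) > len(seg_b) else -1
--
--         if seg_a != seg_b:
--             return 1 if seg_a > seg_b else -1
--
--     if i >= la and j >= lb:
--         return 0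
--     if i >= la:
--         return -1
--     return 1
-- ===== SOURCE B (Python) =====
-- def _tokens(s):
--     """One-pass tokenizer: ('~',''), ('^',''), ('num', digits-without-leading-zeros), ('alpha', letters)."""
--     toks = []
--     i, n = 0, len(s)
--     while i < n:
--         c = s[i]
--         if c in '~^':
--             toks.append((c, ''))
--             i += 1
--         elif c.isdigit():
--             j = i
--             while j < n and s[j].isdigit():
--                 j += 1
--             toks.append(('num', s[i:j].lstrip('0') or '0'))
--             i = j
--         elif c.isalpha():
--             j = i
--             while j < n and s[j].isalpha():
--                 j += 1
--             toks.append(('alpha', s[i:j]))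
--             i = j
--         else:
--             i += 1
--     return toks
--
--
-- def rpmvercmp_segment(a: str, b: str) -> int:
--     """Tokenize each string once, then compare token lists position by position."""
--     if a == b:
--         return 0
--     ta, tb = _tokens(a), _tokens(b)
--     k = 0
--     while True:
--         x = ta[k] if k < len(ta) else None
--         y = tb[k] if k < len(tb) else None
--         if x is not None and x[0] == '~':
--             if y is None or y[0] != '~':
--                 return -1
--             k += 1
--             continue
--         if y is not None and y[0] == '~':
--             return 1
--         if x is not None and x[0] == '^':
--             if y is None or y[0] != '^':
--                 return 1
--             k += 1
--             continue
--         if y is not None and y[0] == '^':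
--             return -1
--         if x is None or y is None:
--             if x is None and y is None:
--                 return 0
--             return -1 if x is None else 1
--         if x[0] == 'num' and y[0] == 'alpha':
--             return 1
--         if x[0] == 'alpha' and y[0] == 'num':
--             return -1
--         if x[0] == 'num' and len(x[1]) != len(y[1]):
--             return 1 if len(x[1]) > len(y[1]) else -1
--         if x[1] != y[1]:
--             return 1 if x[1] > y[1] else -1
--         k += 1
-- ===== Notes on version B (the rewrite author's own statement) =====
-- stated objective: alternative
-- what changed: A walks both strings with one interleaved two-index loop that skips, classifies and slices on the fly; B first tokenizes each string independently in one pass into ~/^/num/alpha tokens (numeric tokens already zero-stripped) and then compares the two token lists position by position.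
import Mathlib
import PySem

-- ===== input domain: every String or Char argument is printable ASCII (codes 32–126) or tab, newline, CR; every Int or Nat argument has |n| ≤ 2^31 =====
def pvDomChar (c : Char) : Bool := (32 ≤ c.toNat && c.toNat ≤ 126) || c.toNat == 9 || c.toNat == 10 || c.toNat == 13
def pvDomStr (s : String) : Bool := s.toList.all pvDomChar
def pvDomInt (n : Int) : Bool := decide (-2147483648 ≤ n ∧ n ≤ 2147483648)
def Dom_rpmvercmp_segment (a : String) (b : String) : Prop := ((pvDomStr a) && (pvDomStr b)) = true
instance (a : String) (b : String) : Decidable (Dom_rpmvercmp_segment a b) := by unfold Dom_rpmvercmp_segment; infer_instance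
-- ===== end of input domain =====

-- B restructures A's single interleaved index-walk into a one-pass tokenizer plus a
-- positional token-list comparison (objective: alternative decomposition, same cost).

-- shared ports of Python char/str built-ins (exact on the ASCII domain):
-- c.isdigit() / c.isalpha() for ASCII chars
def pyIsDigit (c : Char) : Bool := '0' ≤ c && c ≤ '9'
def pyIsAlpha (c : Char) : Bool := ('a' ≤ c && c ≤ 'z') || ('A' ≤ c && c ≤ 'Z')
-- "not a[i].isalnum() and a[i] not in '~^'" (separator chars that both programs skip)
def sepChar (c : Char) : Bool := !(pyIsDigit c || pyIsAlpha c) && c ≠ '~' && c ≠ '^'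
-- s.lstrip("0") or "0"
def stripZeros (s : List Char) : List Char :=
  let t := s.dropWhile (· = '0')
  if t = [] then ['0'] else t
-- Python's  seg_a > seg_b  on strings (code-point lexicographic)
def lexGt : List Char → List Char → Bool
  | _ :: _, [] => true
  | [], _ => false
  | c :: cs, d :: ds => if c = d then lexGt cs ds else decide (d < c)

-- ===== PORT A =====
-- A's outer while loop; the two inner "skip separator" while loops are the sepChar
-- recursive cases, the digit/alpha segment-consuming inner loops are takeWhile/dropWhile.
def loopA (xs ys : List Char) : Int :=
  match xs, ys with
  | [], [] => 0
  | [], y :: yr =>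
    if sepChar y then loopA [] yr
    else if y = '~' then 1 else if y = '^' then -1 else -1
  | x :: xr, [] =>
    if sepChar x then loopA xr []
    else if x = '~' then -1 else if x = '^' then 1 else 1
  | x :: xr, y :: yr =>
    if sepChar x then loopA xr (y :: yr)
    else if sepChar y then loopA (x :: xr) yr
    else if x = '~' then (if y = '~' then loopA xr yr else -1)
    else if y = '~' then 1
    else if x = '^' then (if y = '^' then loopA xr yr else 1)
    else if y = '^' then -1
    else
      let na := pyIsDigit x
      let nb := pyIsDigit y
      let sa := if na then stripZeros (x :: xr.takeWhile pyIsDigit) else x :: xr.takeWhile pyIsAlpha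
      let sb := if nb then stripZeros (y :: yr.takeWhile pyIsDigit) else y :: yr.takeWhile pyIsAlpha
      if na && !nb then 1
      else if !na && nb then -1
      else if na && (sa.length ≠ sb.length : Bool) then (if sa.length > sb.length then 1 else -1)
      else if sa ≠ sb then (if lexGt sa sb then 1 else -1)
      else loopA (if na then xr.dropWhile pyIsDigit else xr.dropWhile pyIsAlpha)
                 (if nb then yr.dropWhile pyIsDigit else yr.dropWhile pyIsAlpha)
  termination_by xs.length + ys.length
  decreasing_by
  all_goals simp only [List.length_cons]
  all_goals try omega
  all_goals
    (have h1 := List.length_dropWhile_le (p := pyIsDigit) xr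
     have h2 := List.length_dropWhile_le (p := pyIsAlpha) xr
     have h3 := List.length_dropWhile_le (p := pyIsDigit) yr
     have h4 := List.length_dropWhile_le (p := pyIsAlpha) yr
     split <;> split <;> omega)

def rpmvercmp_segment (a : String) (b : String) : Int :=
  if a = b then 0 else loopA a.toList b.toList

-- ===== PORT B =====
inductive Tok where
  | tilde : Tok
  | caret : Tok
  | num : List Char → Tok
  | alpha : List Char → Tok
deriving DecidableEq, Repr

-- Source B's _tokens: one pass over the characters
def tokenize : List Char → List Tok
  | [] => []
  | c :: r =>
    if c = '~' then Tok.tilde :: tokenize r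
    else if c = '^' then Tok.caret :: tokenize r
    else if pyIsDigit c then
      Tok.num (stripZeros (c :: r.takeWhile pyIsDigit)) :: tokenize (r.dropWhile pyIsDigit)
    else if pyIsAlpha c then
      Tok.alpha (c :: r.takeWhile pyIsAlpha) :: tokenize (r.dropWhile pyIsAlpha)
    else tokenize r
  termination_by l => l.length
  decreasing_by
  all_goals simp only [List.length_cons]
  all_goals try omega
  all_goals
    (have h1 := List.length_dropWhile_le (p := pyIsDigit) r
     have h2 := List.length_dropWhile_le (p := pyIsAlpha) r
     omega)

-- Source B's positional comparison loop over the two token lists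
def cmpTokens : List Tok → List Tok → Int
  | Tok.tilde :: xr, Tok.tilde :: yr => cmpTokens xr yr
  | Tok.tilde :: _, _ => -1
  | _, Tok.tilde :: _ => 1
  | Tok.caret :: xr, Tok.caret :: yr => cmpTokens xr yr
  | Tok.caret :: _, _ => 1
  | _, Tok.caret :: _ => -1
  | [], [] => 0
  | [], _ => -1
  | _, [] => 1
  | Tok.num _ :: _, Tok.alpha _ :: _ => 1
  | Tok.alpha _ :: _, Tok.num _ :: _ => -1
  | Tok.num sa :: xr, Tok.num sb :: yr =>
    if sa.length ≠ sb.length then (if sa.length > sb.length then 1 else -1)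
    else if sa ≠ sb then (if lexGt sa sb then 1 else -1)
    else cmpTokens xr yr
  | Tok.alpha sa :: xr, Tok.alpha sb :: yr =>
    if sa ≠ sb then (if lexGt sa sb then 1 else -1)
    else cmpTokens xr yr

def rpmvercmp_segment_alt (a : String) (b : String) : Int :=
  if a = b then 0 else cmpTokens (tokenize a.toList) (tokenize b.toList)

-- ===== PRECONDITION & SPEC =====
def Spec_rpmvercmp_segment (a : String) (b : String) (out : Int) : Prop := out = rpmvercmp_segment_alt a b
instance (a : String) (b : String) (out : Int) : Decidable (Spec_rpmvercmp_segment a b out) := by unfold Spec_rpmvercmp_segment; infer_instance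

-- ===== CLAIM (what is proved, stated in full; the proofs are below) =====
def Claim_equal_rpmvercmp_segment : Prop := ∀ (a : String) (b : String), Dom_rpmvercmp_segment a b → Spec_rpmvercmp_segment a b (rpmvercmp_segment a b)

-- ===== LEMMAS AND PROOFS =====

theorem sep_kind (c : Char) (hs : sepChar c ≠ true) :
    c = '~' ∨ c = '^' ∨ (c ≠ '~' ∧ c ≠ '^' ∧ pyIsDigit c = true) ∨
      (c ≠ '~' ∧ c ≠ '^' ∧ pyIsDigit c = false ∧ pyIsAlpha c = true) := by
  by_cases h1 : c = '~'
  · exact Or.inl h1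
  by_cases h2 : c = '^'
  · exact Or.inr (Or.inl h2)
  simp [sepChar, h1, h2] at hs
  by_cases hd : pyIsDigit c = true
  · exact Or.inr (Or.inr (Or.inl ⟨h1, h2, hd⟩))
  · have hd' : pyIsDigit c = false := by simpa using hd
    exact Or.inr (Or.inr (Or.inr ⟨h1, h2, hd', hs hd'⟩))

theorem tokenize_sep (c : Char) (r : List Char) (h : sepChar c = true) :
    tokenize (c :: r) = tokenize r := by
  simp only [sepChar, Bool.and_eq_true, Bool.not_eq_true', Bool.or_eq_false_iff,
    decide_eq_true_eq] at h
  obtain ⟨⟨⟨hd, ha⟩, h1⟩, h2⟩ := h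
  simp [tokenize, h1, h2, hd, ha]

theorem loop_eq_aux : ∀ n : Nat, ∀ xs ys : List Char, xs.length + ys.length ≤ n →
    loopA xs ys = cmpTokens (tokenize xs) (tokenize ys) := by
  intro n
  induction n with
  | zero =>
    intro xs ys h
    cases xs <;> cases ys <;> simp_all
    simp [loopA, tokenize, cmpTokens]
  | succ n ih =>
    intro xs ys hlen
    match xs, ys with
    | [], [] => simp [loopA, tokenize, cmpTokens]
    | [], y :: yr =>
      by_cases hsy : sepChar y = true
      · rw [tokenize_sep _ _ hsy, show loopA [] (y :: yr) = loopA [] yr from by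
          simp [loopA, hsy]]
        exact ih [] yr (by simp at hlen ⊢; omega)
      · rcases sep_kind y hsy with h | h | ⟨h1, h2, h3⟩ | ⟨h1, h2, h3, h4⟩
        · subst h; simp [loopA, tokenize, cmpTokens, hsy]
        · subst h; simp [loopA, tokenize, cmpTokens, hsy]
        · simp [loopA, tokenize, cmpTokens, hsy, h1, h2, h3]
        · simp [loopA, tokenize, cmpTokens, hsy, h1, h2, h3, h4]
    | x :: xr, [] =>
      by_cases hsx : sepChar x = true
      · rw [tokenize_sep _ _ hsx, show loopA (x :: xr) [] = loopA xr [] from by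
          simp [loopA, hsx]]
        exact ih xr [] (by simp at hlen ⊢; omega)
      · rcases sep_kind x hsx with h | h | ⟨h1, h2, h3⟩ | ⟨h1, h2, h3, h4⟩
        · subst h; simp [loopA, tokenize, cmpTokens, hsx]
        · subst h; simp [loopA, tokenize, cmpTokens, hsx]
        · simp [loopA, tokenize, cmpTokens, hsx, h1, h2, h3]
        · simp [loopA, tokenize, cmpTokens, hsx, h1, h2, h3, h4]
    | x :: xr, y :: yr =>
      by_cases hsx : sepChar x = true
      · rw [tokenize_sep _ _ hsx, show loopA (x :: xr) (y :: yr) = loopA xr (y :: yr) from by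
          simp [loopA, hsx]]
        exact ih xr (y :: yr) (by simp at hlen ⊢; omega)
      · by_cases hsy : sepChar y = true
        · rw [tokenize_sep _ _ hsy, show loopA (x :: xr) (y :: yr) = loopA (x :: xr) yr from by
            simp [loopA, hsx, hsy]]
          exact ih (x :: xr) yr (by simp at hlen ⊢; omega)
        · have hdx := List.length_dropWhile_le (p := pyIsDigit) xr
          have hax := List.length_dropWhile_le (p := pyIsAlpha) xr
          have hdy := List.length_dropWhile_le (p := pyIsDigit) yr
          have hay := List.length_dropWhile_le (p := pyIsAlpha) yr
          simp only [List.length_cons] at hlen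
          rcases sep_kind x hsx with hx | hx | ⟨hx1, hx2, hx3⟩ | ⟨hx1, hx2, hx3, hx4⟩ <;>
            rcases sep_kind y hsy with hy | hy | ⟨hy1, hy2, hy3⟩ | ⟨hy1, hy2, hy3, hy4⟩
          · subst hx; subst hy
            simp [loopA, tokenize, cmpTokens, hsx]
            exact ih xr yr (by omega)
          · subst hx; subst hy; simp [loopA, tokenize, cmpTokens, hsx, hsy]
          · subst hx; simp [loopA, tokenize, cmpTokens, hsx, hsy, hy1, hy2, hy3]
          · subst hx; simp [loopA, tokenize, cmpTokens, hsx, hsy, hy1, hy2, hy3, hy4]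
          · subst hx; subst hy; simp [loopA, tokenize, cmpTokens, hsx, hsy]
          · subst hx; subst hy
            simp [loopA, tokenize, cmpTokens, hsx]
            exact ih xr yr (by omega)
          · subst hx; simp [loopA, tokenize, cmpTokens, hsx, hsy, hy1, hy2, hy3]
          · subst hx; simp [loopA, tokenize, cmpTokens, hsx, hsy, hy1, hy2, hy3, hy4]
          · subst hy; simp [loopA, tokenize, cmpTokens, hsx, hsy, hx1, hx2, hx3]
          · subst hy; simp [loopA, tokenize, cmpTokens, hsx, hsy, hx1, hx2, hx3]
          · -- num vs num
            simp [loopA, tokenize, cmpTokens, hsx, hsy, hx1, hx2, hx3, hy1, hy2, hy3]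
            split_ifs <;> try rfl
            exact ih (xr.dropWhile pyIsDigit) (yr.dropWhile pyIsDigit) (by omega)
          · -- num vs alpha
            simp [loopA, tokenize, cmpTokens, hsx, hsy, hx1, hx2, hx3, hy1, hy2, hy3, hy4]
          · subst hy; simp [loopA, tokenize, cmpTokens, hsx, hsy, hx1, hx2, hx3, hx4]
          · subst hy; simp [loopA, tokenize, cmpTokens, hsx, hsy, hx1, hx2, hx3, hx4]
          · -- alpha vs num
            simp [loopA, tokenize, cmpTokens, hsx, hsy, hx1, hx2, hx3, hx4, hy1, hy2, hy3]
          · -- alpha vs alpha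
            simp [loopA, tokenize, cmpTokens, hsx, hsy, hx1, hx2, hx3, hx4, hy1, hy2, hy3, hy4]
            split_ifs <;> try rfl
            exact ih (xr.dropWhile pyIsAlpha) (yr.dropWhile pyIsAlpha) (by omega)

theorem loop_eq_cmp (xs ys : List Char) : loopA xs ys = cmpTokens (tokenize xs) (tokenize ys) :=
  loop_eq_aux (xs.length + ys.length) xs ys le_rfl

-- ===== VERDICT (by name: the statement is the Claim_ definition above) =====
theorem rpmvercmp_segment_spec : Claim_equal_rpmvercmp_segment := by
  intro a b _
  unfold Spec_rpmvercmp_segment rpmvercmp_segment rpmvercmp_segment_alt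
  split
  · rfl
  · exact loop_eq_cmp _ _
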